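-- pv_equiv track=rewrite | github.com/Beomjw/programmers | 프로그래머스/0/181931. 등차수열의 특정한 항만 더하기/등차수열의 특정한 항만 더하기.py | solution
-- ===== SOURCE A (Python) =====
-- def solution(a, d, included):
--     answer = 0
--     arr = [a]
--     # 등차수열의 일반항 : a + (n-1)d
--
--     for i in range(1, len(included)):
--         arr.append(a + i*d)
--
--     for i in range(len(included)):
--         if included[i] == 1:
--             answer += arr[i]
--
--     return answer
-- ===== SOURCE B (Python) =====
-- def solution(a, d, included):
--     # Single pass: factor sum(a + i*d over selected i) = a*count + d*(sum of selected indices).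
--     count = 0
--     idx_sum = 0
--     for i, flag in enumerate(included):
--         if flag == 1:
--             count += 1
--             idx_sum += i
--     return a * count + d * idx_sum
-- ===== Notes on version B (the rewrite author's own statement) =====
-- stated objective: faster
-- what changed: B never builds the term list: it scans enumerate(included) once accumulating the count of selected positions and the sum of selected indices, returning a*count + d*index_sum by algebraic factoring (constant-factor speedup: no O(n) list of terms is allocated and no second pass over it).
import Mathlib
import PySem

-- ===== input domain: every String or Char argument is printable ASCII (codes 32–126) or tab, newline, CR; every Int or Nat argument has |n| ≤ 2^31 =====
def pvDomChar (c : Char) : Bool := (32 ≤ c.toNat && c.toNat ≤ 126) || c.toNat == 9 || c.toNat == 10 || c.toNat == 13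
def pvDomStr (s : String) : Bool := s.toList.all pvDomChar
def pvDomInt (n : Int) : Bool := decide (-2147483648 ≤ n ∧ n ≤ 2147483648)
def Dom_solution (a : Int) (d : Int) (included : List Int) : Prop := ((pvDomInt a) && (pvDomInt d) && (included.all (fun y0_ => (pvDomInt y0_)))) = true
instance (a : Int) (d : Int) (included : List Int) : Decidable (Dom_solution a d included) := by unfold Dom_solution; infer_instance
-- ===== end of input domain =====

-- B replaces A's build-a-term-list-then-sum with a single enumerate pass accumulating
-- the count of selected positions and the sum of selected indices (a*count + d*index_sum).

-- ===== PORT A =====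
def solution (a : Int) (d : Int) (included : List Int) : Int :=
  let arr := (PySem.List.pyRange 1 (included.length : Int) 1).foldl
    (fun arr i => arr ++ [a + i * d]) [a]
  (PySem.List.pyRange 0 (included.length : Int) 1).foldl
    (fun answer i =>
      if PySem.List.pyGetD included i 0 == 1 then answer + PySem.List.pyGetD arr i 0
      else answer) 0

-- ===== PORT B =====
def solution_alt (a : Int) (d : Int) (included : List Int) : Int :=
  let p := (PySem.List.enumerate included 0).foldl
    (fun (cs : Int × Int) ix => if ix.2 == 1 then (cs.1 + 1, cs.2 + ix.1) else cs) (0, 0)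
  a * p.1 + d * p.2

-- ===== PRECONDITION & SPEC =====
def Spec_solution (a : Int) (d : Int) (included : List Int) (out : Int) : Prop := out = solution_alt a d included
instance (a : Int) (d : Int) (included : List Int) (out : Int) : Decidable (Spec_solution a d included out) := by unfold Spec_solution; infer_instance

-- ===== CLAIM (what is proved, stated in full; the proofs are below) =====
def Claim_equal_solution : Prop := ∀ (a : Int) (d : Int) (included : List Int), Dom_solution a d included → Spec_solution a d included (solution a d included)

-- ===== LEMMAS AND PROOFS =====

-- Both loops, reduced to folds over the same index list, are linked by this linearity fact.
theorem key_fold (a d : Int) (included : List Int) (l : List Int) :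
    ∀ (acc c s : Int),
      l.foldl (fun ans i => if PySem.List.pyGetD included i 0 == 1 then ans + (a + i * d) else ans) acc
        = acc + a * ((l.foldl (fun (cs : Int × Int) j =>
              if PySem.List.pyGetD included j 0 == 1 then (cs.1 + 1, cs.2 + j) else cs) (c, s)).1 - c)
            + d * ((l.foldl (fun (cs : Int × Int) j =>
              if PySem.List.pyGetD included j 0 == 1 then (cs.1 + 1, cs.2 + j) else cs) (c, s)).2 - s) := by
  induction l with
  | nil => intro acc c s; simp
  | cons x t ih =>
    intro acc c s
    simp only [List.foldl_cons]
    cases hx : (PySem.List.pyGetD included x 0 == 1) with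
    | true =>
      simp only [if_true]
      rw [ih (acc + (a + x * d)) (c + 1) (s + x)]
      ring
    | false =>
      simp only [Bool.false_eq_true, if_false]
      exact ih acc c s

theorem solution_eq (a : Int) (d : Int) (included : List Int) :
    solution a d included = solution_alt a d included := by
  cases included with
  | nil => simp [solution, solution_alt, PySem.List.enumerate, PySem.List.pyRange]
  | cons x xs =>
    unfold solution solution_alt
    have hlen : (1 : Int) ≤ ((x :: xs).length : Int) := by
      have := Int.ofNat_le.mpr (Nat.succ_le_succ (Nat.zero_le xs.length))
      simpa using this
    -- arr is the map of (fun i => a + i*d) over range 0..n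
    have harr : (PySem.List.pyRange 1 ((x :: xs).length : Int) 1).foldl
        (fun arr i => arr ++ [a + i * d]) [a]
        = (PySem.List.pyRange 0 ((x :: xs).length : Int) 1).map (fun i => a + i * d) := by
      rw [PySem.List.foldl_append_singleton_eq_map]
      rw [PySem.List.pyRange_one_append 0 1 ((x :: xs).length : Int) (by norm_num) hlen]
      have h01 : PySem.List.pyRange 0 1 1 = [0] := by decide
      simp only [h01, List.map_cons, List.cons_append, List.nil_append]
      congr 1
      ring
    rw [harr]
    -- rewrite arr lookups to the formula
    have hbody : (PySem.List.pyRange 0 ((x :: xs).length : Int) 1).foldl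
        (fun answer i =>
          if PySem.List.pyGetD (x :: xs) i 0 == 1 then
            answer + PySem.List.pyGetD ((PySem.List.pyRange 0 ((x :: xs).length : Int) 1).map (fun i => a + i * d)) i 0
          else answer) 0
        = (PySem.List.pyRange 0 ((x :: xs).length : Int) 1).foldl
        (fun answer i =>
          if PySem.List.pyGetD (x :: xs) i 0 == 1 then answer + (a + i * d) else answer) 0 := by
      apply PySem.List.foldl_congr_mem
      intro acc i hi
      rw [PySem.List.mem_pyRange_one] at hi
      rw [PySem.List.pyGetD_map_pyRange_of_nonneg _ _ _ _ hi.1 hi.2]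
    rw [hbody]
    -- B's fold over enumerate as a fold over the same range
    rw [PySem.List.enumerate_eq_map_pyRange (x :: xs) 0, List.foldl_map]
    simp only [PySem.List.len_eq]
    rw [key_fold a d (x :: xs) _ 0 0 0]
    ring

-- ===== VERDICT (by name: the statement is the Claim_ definition above) =====
theorem solution_spec : Claim_equal_solution := by
  intro a d included _
  exact solution_eq a d included
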